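-- pv_equiv track=rewrite | github.com/udilerner99/My_Notes | csv_work/python_sample/sample_6.py | longest_even_sum_subarray
-- ===== SOURCE A (Python) =====
-- def longest_even_sum_subarray(nums: list[int]) -> int:
--     prefix_parity = {0: -1}  # parity -> earliest index
--     current = 0
--     longest = 0
--
--     for i, n in enumerate(nums):
--         current = (current + n) % 2  # 0 = even sum, 1 = odd
--
--         if current in prefix_parity:
--             longest = max(longest, i - prefix_parity[current])
--         else:
--             prefix_parity[current] = i
--
--     return longest
-- ===== SOURCE B (Python) =====
-- def longest_even_sum_subarray(nums: list[int]) -> int: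
--     if sum(nums) % 2 == 0:
--         return len(nums)
--     first_odd = next(i for i, n in enumerate(nums) if n % 2)
--     last_odd = len(nums) - 1 - next(i for i, n in enumerate(reversed(nums)) if n % 2)
--     return max(len(nums) - 1 - first_odd, last_odd)
-- ===== Notes on version B (the rewrite author's own statement) =====
-- stated objective: simpler
-- what changed: Replaced the prefix-parity hashmap running-max loop by a total-parity check plus a closed form over the first and last odd positions (whole array if the sum is even, else max(len-1-first_odd, last_odd)).
import Mathlib
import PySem

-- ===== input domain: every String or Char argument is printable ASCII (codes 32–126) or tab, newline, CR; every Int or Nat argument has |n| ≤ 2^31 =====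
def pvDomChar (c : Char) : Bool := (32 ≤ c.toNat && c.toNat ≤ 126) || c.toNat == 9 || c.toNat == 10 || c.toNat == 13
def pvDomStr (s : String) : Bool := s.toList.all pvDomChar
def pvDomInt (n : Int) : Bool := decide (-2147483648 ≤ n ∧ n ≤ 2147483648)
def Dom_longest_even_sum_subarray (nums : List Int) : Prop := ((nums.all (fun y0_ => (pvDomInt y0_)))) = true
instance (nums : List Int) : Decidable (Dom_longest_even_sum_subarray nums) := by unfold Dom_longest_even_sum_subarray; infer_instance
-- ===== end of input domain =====

-- B replaces A's prefix-parity hashmap running-max loop by a total-parity check plus a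
-- closed form over the first and last odd positions (objective: simpler).

-- ===== PORT A =====
-- one iteration of A's for-loop over (i, n); state = (prefix_parity, current, longest)
def lessStepA (st : PySem.Dict Int Int × Int × Int) (p : Int × Int) :
    PySem.Dict Int Int × Int × Int :=
  match st, p with
  | (pp, current, longest), (i, n) =>
    let current := PySem.Int.mod (current + n) 2
    if pp.contains current then
      (pp, current, max longest (i - pp.getD current 0))
    else
      (pp.insert current i, current, longest)

def longest_even_sum_subarray (nums : List Int) : Int :=
  ((PySem.List.enumerate nums).foldl lessStepA
    (PySem.Dict.ofList [((0 : Int), (-1 : Int))], (0 : Int), (0 : Int))).2.2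

-- ===== PORT B =====
def longest_even_sum_subarray_alt (nums : List Int) : Int :=
  if PySem.Int.mod nums.sum 2 = 0 then (nums.length : Int)
  else
    let firstOdd : Int := (nums.findIdx (fun n => PySem.Int.mod n 2 != 0) : Nat)
    let lastOdd : Int :=
      (nums.length : Int) - 1 - (nums.reverse.findIdx (fun n => PySem.Int.mod n 2 != 0) : Nat)
    max ((nums.length : Int) - 1 - firstOdd) lastOdd

-- ===== PRECONDITION & SPEC =====
def Spec_longest_even_sum_subarray (nums : List Int) (out : Int) : Prop := out = longest_even_sum_subarray_alt nums
instance (nums : List Int) (out : Int) : Decidable (Spec_longest_even_sum_subarray nums out) := by unfold Spec_longest_even_sum_subarray; infer_instance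

-- ===== CLAIM (what is proved, stated in full; the proofs are below) =====
def Claim_equal_longest_even_sum_subarray : Prop := ∀ (nums : List Int), Dom_longest_even_sum_subarray nums → Spec_longest_even_sum_subarray nums (longest_even_sum_subarray nums)

-- ===== LEMMAS AND PROOFS =====

-- the dict A has built after scanning l
def dictOfAux (l : List Int) : PySem.Dict Int Int :=
  if l.any (fun n => PySem.Int.mod n 2 != 0) then
    PySem.Dict.ofList [((0 : Int), (-1 : Int)),
      ((1 : Int), ((l.findIdx (fun n => PySem.Int.mod n 2 != 0) : Nat) : Int))]
  else PySem.Dict.ofList [((0 : Int), (-1 : Int))]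

lemma sum_even_of_no_odd (l : List Int) (h : l.any (fun n => PySem.Int.mod n 2 != 0) = false) :
    l.sum % 2 = 0 := by
  induction l with
  | nil => simp
  | cons a t ih =>
      simp only [List.any_cons, Bool.or_eq_false_iff] at h
      have ha : PySem.Int.mod a 2 = 0 := by
        rcases h with ⟨h1, _⟩
        simpa using h1
      rw [PySem.Int.mod_eq_emod_of_pos (by omega)] at ha
      have ht := ih h.2
      simp only [List.sum_cons]
      omega

lemma alt_le_length (l : List Int) : longest_even_sum_subarray_alt l ≤ (l.length : Int) := by
  unfold longest_even_sum_subarray_alt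
  split_ifs with h
  · exact le_refl _
  · simp only []
    have h1 : (0:Int) ≤ (l.findIdx (fun n => PySem.Int.mod n 2 != 0) : Nat) := Int.natCast_nonneg _
    have h2 : (0:Int) ≤ (l.reverse.findIdx (fun n => PySem.Int.mod n 2 != 0) : Nat) := Int.natCast_nonneg _
    omega

-- literal-dict computations used by the step lemma (values may be variables; keys are literals)
lemma dict1_contains0 : (PySem.Dict.ofList [((0:Int),(-1:Int))]).contains 0 = true := rfl
lemma dict1_contains1 : (PySem.Dict.ofList [((0:Int),(-1:Int))]).contains 1 = false := rfl
lemma dict1_getD0 : (PySem.Dict.ofList [((0:Int),(-1:Int))]).getD 0 0 = -1 := rfl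
lemma dict1_insert1 (v : Int) :
    (PySem.Dict.ofList [((0:Int),(-1:Int))]).insert 1 v
      = PySem.Dict.ofList [((0:Int),(-1:Int)),((1:Int),v)] := rfl
lemma dict2_contains0 (v : Int) :
    (PySem.Dict.ofList [((0:Int),(-1:Int)),((1:Int),v)]).contains 0 = true := rfl
lemma dict2_contains1 (v : Int) :
    (PySem.Dict.ofList [((0:Int),(-1:Int)),((1:Int),v)]).contains 1 = true := rfl
lemma dict2_getD0 (v : Int) :
    (PySem.Dict.ofList [((0:Int),(-1:Int)),((1:Int),v)]).getD 0 0 = -1 := rfl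
lemma dict2_getD1 (v : Int) :
    (PySem.Dict.ofList [((0:Int),(-1:Int)),((1:Int),v)]).getD 1 0 = v := rfl

lemma step_eq (l : List Int) (x : Int) :
    lessStepA (dictOfAux l, PySem.Int.mod l.sum 2, longest_even_sum_subarray_alt l)
      ((l.length : Int), x)
    = (dictOfAux (l ++ [x]), PySem.Int.mod (l ++ [x]).sum 2,
       longest_even_sum_subarray_alt (l ++ [x])) := by
  have hmod : ∀ a : Int, PySem.Int.mod a 2 = a % 2 :=
    fun a => PySem.Int.mod_eq_emod_of_pos (by omega)
  have hsum : (l ++ [x]).sum = l.sum + x := by simp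
  have halt : longest_even_sum_subarray_alt l ≤ (l.length : Int) := alt_le_length l
  by_cases ho : l.any (fun n => PySem.Int.mod n 2 != 0)
  · have hfo : List.findIdx (fun n => PySem.Int.mod n 2 != 0) l < l.length :=
      List.findIdx_lt_length.mpr (List.any_eq_true.mp ho)
    have hany' : ((l ++ [x]).any fun n => PySem.Int.mod n 2 != 0) = true := by
      rw [List.any_append, ho, Bool.true_or]
    have hfa : List.findIdx (fun n => PySem.Int.mod n 2 != 0) (l ++ [x])
        = List.findIdx (fun n => PySem.Int.mod n 2 != 0) l := by
      rw [List.findIdx_append, if_pos hfo]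
    have hdl : dictOfAux l = PySem.Dict.ofList [((0:Int),(-1:Int)),
        ((1:Int), ((List.findIdx (fun n => PySem.Int.mod n 2 != 0) l : Nat) : Int))] := by
      rw [dictOfAux, if_pos ho]
    have hdr : dictOfAux (l ++ [x]) = PySem.Dict.ofList [((0:Int),(-1:Int)),
        ((1:Int), ((List.findIdx (fun n => PySem.Int.mod n 2 != 0) l : Nat) : Int))] := by
      rw [dictOfAux, if_pos hany', hfa]
    by_cases hx : PySem.Int.mod x 2 = 0
    · -- appended element even: total parity unchanged
      have hxe : x % 2 = 0 := by rw [hmod] at hx; exact hx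
      have hfx : ((fun n => PySem.Int.mod n 2 != 0) x) = false := by
        simp [hxe]
      have hra : List.findIdx (fun n => PySem.Int.mod n 2 != 0) (l ++ [x]).reverse
          = List.findIdx (fun n => PySem.Int.mod n 2 != 0) l.reverse + 1 := by
        simp [List.findIdx_cons, hxe]
      rcases Int.emod_two_eq l.sum with hp | hp
      · -- even so far, q = 0
        have hcur : PySem.Int.mod (PySem.Int.mod l.sum 2 + x) 2 = 0 := by
          rw [hmod, hmod]; omega
        have hq : (l.sum + x) % 2 = 0 := by omega
        rw [hdl]
        simp only [lessStepA, hcur, dict2_contains0, if_true, dict2_getD0]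
        rw [hdr]
        simp only [Prod.mk.injEq]
        refine ⟨by trivial, by rw [hmod, hsum]; omega, ?_⟩
        have h1 : longest_even_sum_subarray_alt l = (l.length : Int) := by
          simp [longest_even_sum_subarray_alt, hp]
        have h2 : longest_even_sum_subarray_alt (l ++ [x]) = (l.length : Int) + 1 := by
          rw [longest_even_sum_subarray_alt, if_pos (by rw [hmod, hsum]; omega)]
          simp
        rw [h1, h2]; omega
      · -- odd so far, q = 1
        have hcur : PySem.Int.mod (PySem.Int.mod l.sum 2 + x) 2 = 1 := by
          rw [hmod, hmod]; omega
        have hq : (l.sum + x) % 2 = 1 := by omega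
        rw [hdl]
        simp only [lessStepA, hcur, dict2_contains1, if_true, dict2_getD1]
        rw [hdr]
        simp only [Prod.mk.injEq]
        refine ⟨by trivial, by rw [hmod, hsum]; omega, ?_⟩
        have h1 : longest_even_sum_subarray_alt l
            = max ((l.length : Int) - 1 - (List.findIdx (fun n => PySem.Int.mod n 2 != 0) l : Nat))
                  ((l.length : Int) - 1 - (List.findIdx (fun n => PySem.Int.mod n 2 != 0) l.reverse : Nat)) := by
          rw [longest_even_sum_subarray_alt, if_neg (by rw [hmod, hp]; omega)]
        have h2 : longest_even_sum_subarray_alt (l ++ [x])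
            = max (((l.length : Int) + 1) - 1 - (List.findIdx (fun n => PySem.Int.mod n 2 != 0) l : Nat))
                  (((l.length : Int) + 1) - 1 - ((List.findIdx (fun n => PySem.Int.mod n 2 != 0) l.reverse : Nat) + 1)) := by
          rw [longest_even_sum_subarray_alt, if_neg (by rw [hmod, hsum]; omega), hfa, hra]
          simp only [List.length_append, List.length_singleton]
          push_cast
          ring_nf
        rw [h1, h2]; omega
    · -- appended element odd: total parity flips
      have hxo : x % 2 = 1 := by rw [hmod] at hx; omega
      have hfx : ((fun n => PySem.Int.mod n 2 != 0) x) = true := by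
        simp [hxo]
      have hra : List.findIdx (fun n => PySem.Int.mod n 2 != 0) (l ++ [x]).reverse = 0 := by
        simp [List.findIdx_cons, hxo]
      rcases Int.emod_two_eq l.sum with hp | hp
      · -- even so far, q = 1
        have hcur : PySem.Int.mod (PySem.Int.mod l.sum 2 + x) 2 = 1 := by
          rw [hmod, hmod]; omega
        have hq : (l.sum + x) % 2 = 1 := by omega
        rw [hdl]
        simp only [lessStepA, hcur, dict2_contains1, if_true, dict2_getD1]
        rw [hdr]
        simp only [Prod.mk.injEq]
        refine ⟨by trivial, by rw [hmod, hsum]; omega, ?_⟩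
        have h1 : longest_even_sum_subarray_alt l = (l.length : Int) := by
          simp [longest_even_sum_subarray_alt, hp]
        have h2 : longest_even_sum_subarray_alt (l ++ [x])
            = max (((l.length : Int) + 1) - 1 - (List.findIdx (fun n => PySem.Int.mod n 2 != 0) l : Nat))
                  (((l.length : Int) + 1) - 1 - (0:Int)) := by
          rw [longest_even_sum_subarray_alt, if_neg (by rw [hmod, hsum]; omega), hfa, hra]
          simp only [List.length_append, List.length_singleton]
          push_cast
          ring_nf
        rw [h1, h2]
        have : (0:Int) ≤ (List.findIdx (fun n => PySem.Int.mod n 2 != 0) l : Nat) := Int.natCast_nonneg _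
        omega
      · -- odd so far, q = 0
        have hcur : PySem.Int.mod (PySem.Int.mod l.sum 2 + x) 2 = 0 := by
          rw [hmod, hmod]; omega
        have hq : (l.sum + x) % 2 = 0 := by omega
        rw [hdl]
        simp only [lessStepA, hcur, dict2_contains0, if_true, dict2_getD0]
        rw [hdr]
        simp only [Prod.mk.injEq]
        refine ⟨by trivial, by rw [hmod, hsum]; omega, ?_⟩
        have h2 : longest_even_sum_subarray_alt (l ++ [x]) = (l.length : Int) + 1 := by
          rw [longest_even_sum_subarray_alt, if_pos (by rw [hmod, hsum]; omega)]
          simp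
        rw [h2]; omega
  · have hoF : l.any (fun n => PySem.Int.mod n 2 != 0) = false := by simpa using ho
    have hp0 : l.sum % 2 = 0 := sum_even_of_no_odd l hoF
    have hdl : dictOfAux l = PySem.Dict.ofList [((0:Int),(-1:Int))] := by
      rw [dictOfAux, if_neg (by rw [hoF]; simp)]
    have hfl : List.findIdx (fun n => PySem.Int.mod n 2 != 0) l = l.length := by
      rw [List.findIdx_eq_length]
      intro a ha
      have := (List.any_eq_false.mp hoF) a ha
      simpa using this
    have haltl : longest_even_sum_subarray_alt l = (l.length : Int) := by
      simp [longest_even_sum_subarray_alt, hp0]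
    by_cases hx : PySem.Int.mod x 2 = 0
    · -- still no odd element, q = 0
      have hxe : x % 2 = 0 := by rw [hmod] at hx; exact hx
      have hcur : PySem.Int.mod (PySem.Int.mod l.sum 2 + x) 2 = 0 := by
        rw [hmod, hmod]; omega
      have hany' : ((l ++ [x]).any fun n => PySem.Int.mod n 2 != 0) = false := by
        rw [List.any_eq_false]
        intro a ha
        rcases List.mem_append.mp ha with h | h
        · exact (List.any_eq_false.mp hoF) a h
        · simp only [List.mem_singleton] at h
          subst h
          have hb : (PySem.Int.mod a 2 != 0) = false := by rw [hx]; rfl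
          exact by rw [hb]; simp
      rw [hdl, haltl]
      simp only [lessStepA, hcur, dict1_contains0, if_true, dict1_getD0]
      rw [dictOfAux, if_neg (by rw [hany']; simp)]
      simp only [Prod.mk.injEq]
      refine ⟨by trivial, by rw [hmod, hsum]; omega, ?_⟩
      have h2 : longest_even_sum_subarray_alt (l ++ [x]) = (l.length : Int) + 1 := by
        rw [longest_even_sum_subarray_alt, if_pos (by rw [hmod, hsum]; omega)]
        simp
      rw [h2]; omega
    · -- first odd element appears at index len(l), q = 1
      have hxo : x % 2 = 1 := by rw [hmod] at hx; omega
      have hfx : ((fun n => PySem.Int.mod n 2 != 0) x) = true := by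
        simp [hxo]
      have hcur : PySem.Int.mod (PySem.Int.mod l.sum 2 + x) 2 = 1 := by
        rw [hmod, hmod]; omega
      have hany' : ((l ++ [x]).any fun n => PySem.Int.mod n 2 != 0) = true := by
        rw [List.any_eq_true]
        exact ⟨x, by simp, hfx⟩
      have hfa : List.findIdx (fun n => PySem.Int.mod n 2 != 0) (l ++ [x]) = l.length := by
        rw [List.findIdx_append, hfl]
        simp [List.findIdx_cons, hxo]
      have hra : List.findIdx (fun n => PySem.Int.mod n 2 != 0) (l ++ [x]).reverse = 0 := by
        simp [List.findIdx_cons, hxo]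
      rw [hdl, haltl]
      simp only [lessStepA, hcur]
      rw [if_neg (by rw [dict1_contains1]; simp), dict1_insert1]
      rw [dictOfAux, if_pos hany', hfa]
      simp only [Prod.mk.injEq]
      refine ⟨by trivial, by rw [hmod, hsum]; omega, ?_⟩
      have h2 : longest_even_sum_subarray_alt (l ++ [x])
          = max (((l.length : Int) + 1) - 1 - (l.length : Int)) (((l.length : Int) + 1) - 1 - (0:Int)) := by
        rw [longest_even_sum_subarray_alt, if_neg (by rw [hmod, hsum]; omega), hfa, hra]
        simp only [List.length_append, List.length_singleton]
        push_cast
        ring_nf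
      rw [h2]; omega

lemma state_eq (l : List Int) :
    (PySem.List.enumerate l).foldl lessStepA
      (PySem.Dict.ofList [((0 : Int), (-1 : Int))], (0 : Int), (0 : Int))
    = (dictOfAux l, PySem.Int.mod l.sum 2, longest_even_sum_subarray_alt l) := by
  induction l using List.reverseRecOn with
  | nil => decide
  | append_singleton l x ih =>
      rw [PySem.List.enumerate_append, List.foldl_append, ih]
      simp only [PySem.List.enumerate, List.foldl_cons, List.foldl_nil, zero_add]
      exact step_eq l x

-- ===== VERDICT (by name: the statement is the Claim_ definition above) =====
theorem longest_even_sum_subarray_spec : Claim_equal_longest_even_sum_subarray := by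
  intro nums _
  unfold Spec_longest_even_sum_subarray longest_even_sum_subarray
  rw [state_eq]
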